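-- pv_equiv track=rewrite | github.com/SauravSinha76/scaler | class4/count_sec.py | solve
-- ===== SOURCE A (Python) =====
-- def solve(A):
--     n = len(A)
--     max = A[0]
--     total =0
--     for i in range(1,n):
--         if max < A[i]:
--             max_2 =max
--             max = A[i]
--             total += (max - max_2) *i
--         else:
--             total += max - A[i]
--     return total
-- ===== SOURCE B (Python) =====
-- def solve(A):
--     return len(A) * max(A) - sum(A)
-- ===== Notes on version B (the rewrite author's own statement) =====
-- stated objective: simpler
-- what changed: Replaced the running-max accumulation loop (which retroactively adds each max increase for all earlier indices) by the closed form len(A)*max(A) - sum(A), computed with two C-level library reductions instead of a Python-level accumulating loop.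
-- outside the precondition, e.g. on solve([]): A raises IndexError, B raises ValueError
import Mathlib
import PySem

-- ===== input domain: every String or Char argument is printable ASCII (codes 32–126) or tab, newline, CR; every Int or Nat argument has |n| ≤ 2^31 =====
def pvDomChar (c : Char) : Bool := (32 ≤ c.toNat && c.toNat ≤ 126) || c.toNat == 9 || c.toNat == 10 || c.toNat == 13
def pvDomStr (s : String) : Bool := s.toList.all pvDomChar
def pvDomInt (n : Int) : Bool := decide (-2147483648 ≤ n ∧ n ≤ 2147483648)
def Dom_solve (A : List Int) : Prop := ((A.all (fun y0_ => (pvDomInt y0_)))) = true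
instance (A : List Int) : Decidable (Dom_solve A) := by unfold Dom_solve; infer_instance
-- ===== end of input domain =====

-- B replaces A's running-max accumulation loop by the closed form len(A)*max(A) - sum(A) (simpler).
-- ===== PORT A =====
def solve (A : List Int) : Int :=
  let n : Int := A.length
  let m0 : Int := PySem.List.pyGetD A 0 0      -- A[0]; [] (IndexError) is excluded by Pre_solve
  let st :=
    (PySem.List.pyRange 1 n 1).foldl
      (fun (st : Int × Int) j =>
        let x := PySem.List.pyGetD A j 0       -- A[j], always in range here
        if st.1 < x then (x, st.2 + (x - st.1) * j) else (st.1, st.2 + (st.1 - x)))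
      (m0, 0)
  st.2

-- ===== PORT B =====
def solve_alt (A : List Int) : Int :=
  (A.length : Int) * ((PySem.List.max? A (fun y => y)).getD 0) - A.sum

-- ===== PRECONDITION & SPEC =====
-- Pre_ excludes only the empty list, on which A raises IndexError (A[0]) and B raises ValueError (max([])).
def Pre_solve (A : List Int) : Prop := A ≠ []
instance (A : List Int) : Decidable (Pre_solve A) := by unfold Pre_solve; infer_instance
def pvWitness_solve : List Int := ([3, 1, 4, 1, 5])

def Spec_solve (A : List Int) (out : Int) : Prop := out = solve_alt A
instance (A : List Int) (out : Int) : Decidable (Spec_solve A out) := by unfold Spec_solve; infer_instance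

-- ===== CLAIM (what is proved, stated in full; the proofs are below) =====
def Claim_equal_solve : Prop := ∀ (A : List Int), Dom_solve A → Pre_solve A → Spec_solve A (solve A)

-- ===== LEMMAS AND PROOFS =====

-- Loop invariant: starting the loop at index i with state (m, t), where xs is the unprocessed
-- suffix A.drop i, yields max = foldl max over xs and total = n*max - i*m - sum xs + t.
lemma solve_loop_eq (xs : List Int) : ∀ (A : List Int) (i : Int), 0 ≤ i →
    A.drop i.toNat = xs → i + xs.length = A.length → ∀ (m t : Int),
    (PySem.List.pyRange i (A.length : Int) 1).foldl
      (fun (st : Int × Int) j =>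
        let x := PySem.List.pyGetD A j 0
        if st.1 < x then (x, st.2 + (x - st.1) * j) else (st.1, st.2 + (st.1 - x)))
      (m, t)
    = (xs.foldl max m, (i + xs.length) * (xs.foldl max m) - i * m - xs.sum + t) := by
  induction xs with
  | nil =>
    intro A i h0 hdrop hlen m t
    simp at hlen
    rw [hlen, PySem.List.pyRange_one_eq_nil (le_refl _)]
    simp [← hlen]
  | cons x xs' ih =>
    intro A i h0 hdrop hlen m t
    have hi : i < (A.length : Int) := by simp at hlen ⊢; omega
    have hx : PySem.List.pyGetD A i 0 = x := by
      have h1 : A[i.toNat]? = some x := by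
        rw [← List.head?_drop, hdrop]; rfl
      simp [PySem.List.pyGetD, PySem.List.pyGet?, PySem.List.pyIdx?, h0, hi]
      obtain ⟨_, h2⟩ := List.getElem?_eq_some_iff.mp h1
      exact h2
    have hdrop' : A.drop (i + 1).toNat = xs' := by
      have : (i + 1).toNat = i.toNat + 1 := by omega
      rw [this, ← List.drop_drop, hdrop]; rfl
    have hlen' : (i + 1) + xs'.length = A.length := by simp at hlen ⊢; omega
    rw [PySem.List.pyRange_one_cons hi]
    simp only [List.foldl_cons, hx]
    by_cases hc : m < x
    · rw [if_pos hc]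
      rw [ih A (i + 1) (by omega) hdrop' hlen']
      have hm : max m x = x := by omega
      simp [hm]
      ring
    · rw [if_neg hc]
      rw [ih A (i + 1) (by omega) hdrop' hlen']
      have hm : max m x = m := by omega
      simp [hm]
      ring

-- ===== VERDICT (by name: the statement is the Claim_ definition above) =====
theorem solve_spec : Claim_equal_solve := by
  intro A _hdom hpre
  unfold Spec_solve solve solve_alt
  obtain ⟨a, t, rfl⟩ : ∃ a t, A = a :: t := by
    cases A with
    | nil => exact absurd rfl hpre
    | cons a t => exact ⟨a, t, rfl⟩
  have hm0 : PySem.List.pyGetD (a :: t) 0 0 = a := by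
    simp [PySem.List.pyGetD, PySem.List.pyGet?, PySem.List.pyIdx?]
  have hdrop : (a :: t).drop (1 : Int).toNat = t := rfl
  have hlen : (1 : Int) + t.length = ((a :: t).length : Int) := by simp; ring
  simp only [hm0, solve_loop_eq t (a :: t) 1 (by norm_num) hdrop hlen a 0]
  rw [PySem.List.max?_id_cons]
  simp
  ring
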